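-- pv_equiv track=rewrite | github.com/jack-zs-labs/arc_agi_pretraining_recipe | portable_reasoning_bundle/arc_trajectory_sampler/gsm8k_reasoning_parser.py | sorted_term_ops
-- ===== SOURCE A (Python) =====
-- from typing import Any, DefaultDict, Dict, Iterable, List, Sequence, Tuple
--
-- TERM_OP_NAME = {
--     "add": "sum",
--     "subtract": "offset",
--     "multiply": "scale",
--     "divide": "partition",
-- }
--
-- def sorted_term_ops(derivation_rules: Sequence[Dict[str, Any]]) -> Tuple[str, ...]:
--     seen = []
--     for rule in derivation_rules:
--         term_name = TERM_OP_NAME.get(rule["op"])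
--         if term_name is None or term_name in seen:
--             continue
--         seen.append(term_name)
--     return tuple(seen)
-- ===== SOURCE B (Python) =====
-- from typing import Any, Dict, Sequence, Tuple
--
-- TERM_OP_NAME = {
--     "add": "sum",
--     "subtract": "offset",
--     "multiply": "scale",
--     "divide": "partition",
-- }
--
-- def sorted_term_ops(derivation_rules: Sequence[Dict[str, Any]]) -> Tuple[str, ...]:
--     # Staged approach: extract the op sequence, then for each known op find its
--     # first position (if any), and sort the mapped names by that first position.
--     ops = [rule["op"] for rule in derivation_rules]
--     found = [(ops.index(op), name) for op, name in TERM_OP_NAME.items() if op in ops]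
--     found.sort(key=lambda pair: pair[0])
--     return tuple(name for _, name in found)
-- ===== Notes on version B (the rewrite author's own statement) =====
-- stated objective: alternative
-- what changed: Instead of A's single left-to-right scan with a seen-list dedup, B extracts the op sequence, searches the first position of each of the four known ops (list.index per dict entry), and sorts the mapped names by that first position.
import Mathlib
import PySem

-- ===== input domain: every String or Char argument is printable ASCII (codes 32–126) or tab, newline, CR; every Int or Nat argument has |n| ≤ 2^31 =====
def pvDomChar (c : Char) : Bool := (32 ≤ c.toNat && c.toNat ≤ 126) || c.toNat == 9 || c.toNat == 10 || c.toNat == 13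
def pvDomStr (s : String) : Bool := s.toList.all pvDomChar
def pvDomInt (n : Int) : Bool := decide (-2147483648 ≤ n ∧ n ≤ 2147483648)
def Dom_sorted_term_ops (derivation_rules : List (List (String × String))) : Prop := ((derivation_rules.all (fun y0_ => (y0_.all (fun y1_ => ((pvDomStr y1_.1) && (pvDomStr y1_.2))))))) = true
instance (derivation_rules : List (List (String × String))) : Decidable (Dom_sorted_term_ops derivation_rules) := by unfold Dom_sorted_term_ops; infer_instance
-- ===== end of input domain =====

-- B replaces A's single-pass seen-list dedup by a staged algorithm: extract the op
-- sequence, find each known op's first position, sort the mapped names by that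
-- position; return-value equivalence on rules that all carry an "op" key.

-- ===== PORT A =====
def TERM_OP_NAME : PySem.Dict String String :=
  PySem.Dict.ofList [("add", "sum"), ("subtract", "offset"), ("multiply", "scale"), ("divide", "partition")]

def sorted_term_ops (derivation_rules : List (List (String × String))) : List String :=
  derivation_rules.foldl (fun seen rule =>
    match (PySem.Dict.mk rule).get? "op" with
    | none => seen  -- rule["op"] raises KeyError here; excluded by Pre_
    | some op =>
      match TERM_OP_NAME.get? op with
      | none => seen                    -- term_name is None: continue
      | some term_name =>
        if seen.contains term_name then seen   -- term_name in seen: continue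
        else seen ++ [term_name]) []

-- ===== PORT B =====
-- ops = [rule["op"] for rule in derivation_rules]; a missing "op" key raises KeyError (excluded by Pre_)
def opsOf (derivation_rules : List (List (String × String))) : List String :=
  derivation_rules.map (fun rule => (((PySem.Dict.mk rule).get? "op").getD ""))

-- found = [(ops.index(op), name) for op, name in TERM_OP_NAME.items() if op in ops]
-- ('op in ops' + 'ops.index(op)' together are exactly index? returning some)
def foundOf (ops : List String) : List (Nat × String) :=
  TERM_OP_NAME.items.filterMap (fun p => (PySem.List.index? ops p.1).map (fun i => (i, p.2)))

def sorted_term_ops_alt (derivation_rules : List (List (String × String))) : List String :=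
  (PySem.List.sorted (foundOf (opsOf derivation_rules)) (fun pair => pair.1) false).map
    (fun pair => pair.2)

-- ===== PRECONDITION & SPEC =====
-- Pre_ excludes exactly the rules without an "op" key, on which A's rule["op"] raises KeyError.
def Pre_sorted_term_ops (derivation_rules : List (List (String × String))) : Prop :=
  (derivation_rules.all (fun rule => (PySem.Dict.mk rule).contains "op")) = true
instance (derivation_rules : List (List (String × String))) : Decidable (Pre_sorted_term_ops derivation_rules) := by unfold Pre_sorted_term_ops; infer_instance

def pvWitness_sorted_term_ops : (List (List (String × String))) :=
  [[("op", "divide")], [("op", "add")], [("op", "noop")], [("op", "add")]]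

def Spec_sorted_term_ops (derivation_rules : List (List (String × String))) (out : List String) : Prop := out = sorted_term_ops_alt derivation_rules
instance (derivation_rules : List (List (String × String))) (out : List String) : Decidable (Spec_sorted_term_ops derivation_rules out) := by unfold Spec_sorted_term_ops; infer_instance

-- ===== CLAIM (what is proved, stated in full; the proofs are below) =====
def Claim_equal_sorted_term_ops : Prop := ∀ (derivation_rules : List (List (String × String))), Dom_sorted_term_ops derivation_rules → Pre_sorted_term_ops derivation_rules → Spec_sorted_term_ops derivation_rules (sorted_term_ops derivation_rules)

-- ===== LEMMAS AND PROOFS =====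

-- the per-rule mapping A performs: rule["op"] looked up in TERM_OP_NAME
def termOpA (rule : List (String × String)) : Option String :=
  ((PySem.Dict.mk rule).get? "op").bind (fun op => TERM_OP_NAME.get? op)

-- characterisation of the 4-entry literal dict lookup
lemma g_cases (op nm : String) : TERM_OP_NAME.get? op = some nm ↔
    (op = "add" ∧ nm = "sum") ∨ (op = "subtract" ∧ nm = "offset") ∨
    (op = "multiply" ∧ nm = "scale") ∨ (op = "divide" ∧ nm = "partition") := by
  have h : TERM_OP_NAME = PySem.Dict.mk [("add", "sum"), ("subtract", "offset"), ("multiply", "scale"), ("divide", "partition")] := by decide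
  have he : ∀ k : String, (PySem.Dict.mk ([] : List (String × String))).get? k = none := by
    intro k; rfl
  rw [h]
  simp [PySem.Dict.get?_mk_cons, he]
  split_ifs <;> simp_all [eq_comm]

lemma g_inj {a b x : String} (ha : TERM_OP_NAME.get? a = some x)
    (hb : TERM_OP_NAME.get? b = some x) : a = b := by
  rw [g_cases] at ha hb
  rcases ha with ⟨h1, h2⟩ | ⟨h1, h2⟩ | ⟨h1, h2⟩ | ⟨h1, h2⟩ <;>
    rcases hb with ⟨h3, h4⟩ | ⟨h3, h4⟩ | ⟨h3, h4⟩ | ⟨h3, h4⟩ <;> simp_all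

lemma items_eq : TERM_OP_NAME.items =
    [("add", "sum"), ("subtract", "offset"), ("multiply", "scale"), ("divide", "partition")] := by
  decide

lemma mem_items_iff (o n : String) :
    (o, n) ∈ TERM_OP_NAME.items ↔ TERM_OP_NAME.get? o = some n := by
  rw [g_cases, items_eq]; simp

lemma items_keys_pairwise : TERM_OP_NAME.items.Pairwise (fun p q => p.1 ≠ q.1) := by
  rw [items_eq]; decide

-- every item's key maps to its value
lemma item_key_maps (p : String × String) (hp : p ∈ TERM_OP_NAME.items) :
    TERM_OP_NAME.get? p.1 = some p.2 := (mem_items_iff p.1 p.2).mp hp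

-- appending a different element does not change a first index
lemma index?_snoc_ne (l : List String) (c v : String) (h : v ≠ c) :
    PySem.List.index? (l ++ [c]) v = PySem.List.index? l v := by
  by_cases hv : v ∈ l
  · exact PySem.List.index?_append_of_mem _ hv
  · rw [(PySem.List.index?_eq_none_iff _ _).mpr hv,
      (PySem.List.index?_eq_none_iff _ _).mpr (by simp [hv, h])]

-- appending an op with no mapped name leaves found unchanged
lemma foundOf_snoc_none (ops : List String) (o : String)
    (h : TERM_OP_NAME.get? o = none) : foundOf (ops ++ [o]) = foundOf ops := by
  unfold foundOf
  apply List.filterMap_congr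
  intro p hp
  have hpo : p.1 ≠ o := by
    intro e
    rw [← e, item_key_maps p hp] at h
    cases h
  rw [index?_snoc_ne ops o p.1 hpo]

-- appending an op already present leaves every first index unchanged
lemma foundOf_snoc_mem (ops : List String) (o : String) (ho : o ∈ ops) :
    foundOf (ops ++ [o]) = foundOf ops := by
  unfold foundOf
  apply List.filterMap_congr
  intro p _
  by_cases hpo : p.1 = o
  · rw [hpo, PySem.List.index?_append_of_mem _ ho]
  · rw [index?_snoc_ne ops o p.1 hpo]

-- appending a fresh mapped op: found gains exactly the entry (|ops|, n), up to permutation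
lemma found_snoc_perm (o n : String) (ops : List String) (ho : o ∉ ops) :
    ∀ items : List (String × String), items.Pairwise (fun p q => p.1 ≠ q.1) → (o, n) ∈ items →
    (items.filterMap (fun p => (PySem.List.index? (ops ++ [o]) p.1).map (fun i => (i, p.2)))).Perm
      ((ops.length, n) :: items.filterMap (fun p => (PySem.List.index? ops p.1).map (fun i => (i, p.2)))) := by
  intro items hpw hmem
  induction items with
  | nil => cases hmem
  | cons p rest ih =>
    rcases List.pairwise_cons.mp hpw with ⟨hhead, htail⟩
    rcases List.mem_cons.mp hmem with heq | hmem'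
    · -- head is the fresh entry (o, n)
      have h1 : PySem.List.index? (ops ++ [o]) o = some ops.length :=
        PySem.List.index?_append_singleton_self ops o ho
      have h2 : PySem.List.index? ops o = none := (PySem.List.index?_eq_none_iff ops o).mpr ho
      have h3 : rest.filterMap (fun p => (PySem.List.index? (ops ++ [o]) p.1).map (fun i => (i, p.2)))
          = rest.filterMap (fun p => (PySem.List.index? ops p.1).map (fun i => (i, p.2))) := by
        apply List.filterMap_congr
        intro q hq
        have : q.1 ≠ o := fun e => (heq ▸ hhead q hq) e.symm
        rw [index?_snoc_ne ops o q.1 this]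
      rw [← heq]
      simp only [List.filterMap_cons, h1, h2, h3, Option.map_some, Option.map_none]
      exact List.Perm.refl _
    · -- the fresh entry sits in the tail
      have hne : p.1 ≠ o := hhead (o, n) hmem'
      have hF : PySem.List.index? (ops ++ [o]) p.1 = PySem.List.index? ops p.1 :=
        index?_snoc_ne ops o p.1 hne
      have ihh := ih htail hmem'
      cases hFp : PySem.List.index? ops p.1 with
      | none =>
        simp only [List.filterMap_cons, hF, hFp, Option.map_none]
        exact ihh
      | some i =>
        simp only [List.filterMap_cons, hF, hFp, Option.map_some]
        exact (ihh.cons _).trans (List.Perm.swap _ _ _)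

-- every first index in found is a valid position of ops
lemma foundOf_fst_lt (ops : List String) : ∀ x ∈ foundOf ops, x.1 < ops.length := by
  intro x hx
  rcases List.mem_filterMap.mp hx with ⟨p, _, hF⟩
  cases hFp : PySem.List.index? ops p.1 with
  | none => rw [hFp] at hF; cases hF
  | some i =>
    rw [hFp] at hF
    obtain ⟨hk, -, -⟩ := PySem.List.getElem_of_index?_eq_some hFp
    cases hF
    exact hk

-- first indices of distinct keys are distinct
lemma foundOf_pairwise_ne (ops : List String) :
    (foundOf ops).Pairwise (fun a b => a.1 ≠ b.1) := by
  unfold foundOf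
  rw [List.pairwise_filterMap]
  refine items_keys_pairwise.imp ?_
  intro p q hpq b hb b' hb'
  cases hFp : PySem.List.index? ops p.1 with
  | none => rw [hFp] at hb; cases hb
  | some i =>
    cases hFq : PySem.List.index? ops q.1 with
    | none => rw [hFq] at hb'; cases hb'
    | some j =>
      rw [hFp] at hb; rw [hFq] at hb'
      cases hb; cases hb'
      obtain ⟨hi, hpi, -⟩ := PySem.List.getElem_of_index?_eq_some hFp
      obtain ⟨hj, hqj, -⟩ := PySem.List.getElem_of_index?_eq_some hFq
      intro hij
      have hij' : i = j := by simpa using hij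
      subst hij'
      apply hpq
      rw [← hpi, ← hqj]

-- the sorted found list is strictly increasing in its first component
lemma sorted_found_pairwise_lt (ops : List String) :
    (PySem.List.sorted (foundOf ops) (fun x => x.1) false).Pairwise (fun a b => a.1 < b.1) := by
  have hle := PySem.List.sorted_pairwise (foundOf ops) (fun x => x.1)
  have hne : (PySem.List.sorted (foundOf ops) (fun x => x.1) false).Pairwise (fun a b => a.1 ≠ b.1) :=
    ((PySem.List.sorted_perm (foundOf ops) (fun x => x.1) false).pairwise_iff
      (fun h => h.symm)).mpr (foundOf_pairwise_ne ops)
  exact (hle.and hne).imp (fun h => lt_of_le_of_ne h.1 h.2)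

-- appending a fresh mapped op appends its entry at the end of the sorted found list
lemma sorted_snoc (ops : List String) (o n : String)
    (h : TERM_OP_NAME.get? o = some n) (ho : o ∉ ops) :
    PySem.List.sorted (foundOf (ops ++ [o])) (fun x => x.1) false
      = PySem.List.sorted (foundOf ops) (fun x => x.1) false ++ [(ops.length, n)] := by
  apply PySem.List.sorted_eq_of_perm_of_pairwise_lt
  · have p1 := List.perm_append_singleton (ops.length, n)
      (PySem.List.sorted (foundOf ops) (fun x => x.1) false)
    have p2 : ((ops.length, n) :: PySem.List.sorted (foundOf ops) (fun x => x.1) false).Perm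
        ((ops.length, n) :: foundOf ops) :=
      (PySem.List.sorted_perm (foundOf ops) (fun x => x.1) false).cons _
    have p3 := (found_snoc_perm o n ops ho TERM_OP_NAME.items items_keys_pairwise
      ((mem_items_iff o n).mpr h)).symm
    exact (p1.trans p2).trans p3
  · rw [List.pairwise_append]
    refine ⟨sorted_found_pairwise_lt ops, by simp, ?_⟩
    intro a ha b hb
    rcases List.mem_singleton.mp hb with rfl
    exact foundOf_fst_lt ops a ((PySem.List.mem_sorted _ _ _ a).mp ha)

-- dedup of a one-element extension
lemma dedup_snoc (s : List String) (x : String) :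
    PySem.List.dedup (s ++ [x]) =
      if x ∈ s then PySem.List.dedup s else PySem.List.dedup s ++ [x] := by
  have h1 : PySem.List.dedup (s ++ [x]) = PySem.Set.add (PySem.List.dedup s) x := by
    simp [PySem.List.dedup, PySem.Set.ofList, PySem.Set.add]
  rw [h1]
  by_cases h : x ∈ s <;> simp [PySem.Set.add, h]

-- B's staged computation equals ordered dedup of the mapped name sequence
lemma B_core_eq (ops : List String) :
    (PySem.List.sorted (foundOf ops) (fun pair => pair.1) false).map (fun pair => pair.2)
      = PySem.List.dedup (ops.filterMap (fun op => TERM_OP_NAME.get? op)) := by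
  induction ops using List.reverseRecOn with
  | nil => rfl
  | append_singleton ops o ih =>
    rw [List.filterMap_append]
    cases h : TERM_OP_NAME.get? o with
    | none =>
      rw [foundOf_snoc_none ops o h, ih]
      simp [h]
    | some n =>
      by_cases ho : o ∈ ops
      · have hn : n ∈ ops.filterMap (fun op => TERM_OP_NAME.get? op) :=
          List.mem_filterMap.mpr ⟨o, ho, h⟩
        have hfo : List.filterMap (fun op => TERM_OP_NAME.get? op) [o] = [n] := by simp [h]
        rw [foundOf_snoc_mem ops o ho, ih, hfo, dedup_snoc, if_pos hn]
      · have hn : n ∉ ops.filterMap (fun op => TERM_OP_NAME.get? op) := by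
          intro hmem
          rcases List.mem_filterMap.mp hmem with ⟨o', ho', hg⟩
          exact ho (g_inj hg h ▸ ho')
        have hfo : List.filterMap (fun op => TERM_OP_NAME.get? op) [o] = [n] := by simp [h]
        rw [sorted_snoc ops o n h ho, List.map_append, ih, hfo, dedup_snoc, if_neg hn]
        rfl

-- A's fold over the rules equals the Set.add fold over the mapped-then-filtered name list, from any start.
lemma foldA_eq_add_fold (rules : List (List (String × String))) (seen : List String) :
    rules.foldl (fun seen rule =>
      match (PySem.Dict.mk rule).get? "op" with
      | none => seen
      | some op =>
        match TERM_OP_NAME.get? op with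
        | none => seen
        | some term_name =>
          if seen.contains term_name then seen
          else seen ++ [term_name]) seen
    = (rules.filterMap termOpA).foldl PySem.Set.add seen := by
  induction rules generalizing seen with
  | nil => rfl
  | cons r rs ih =>
    cases h1 : (PySem.Dict.mk r).get? "op" with
    | none =>
      have hf : termOpA r = none := by simp [termOpA, h1]
      simp only [List.foldl_cons, List.filterMap_cons, h1, hf]
      exact ih seen
    | some op =>
      cases h2 : TERM_OP_NAME.get? op with
      | none =>
        have hf : termOpA r = none := by simp [termOpA, h1, h2]
        simp only [List.foldl_cons, List.filterMap_cons, h1, h2, hf]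
        exact ih seen
      | some n =>
        have hf : termOpA r = some n := by simp [termOpA, h1, h2]
        simp only [List.foldl_cons, List.filterMap_cons, h1, h2, hf]
        rw [ih]
        congr 1

-- A computes ordered dedup of the per-rule mapped names
lemma A_eq_dedup (rules : List (List (String × String))) :
    sorted_term_ops rules = PySem.List.dedup (rules.filterMap termOpA) := by
  unfold sorted_term_ops
  rw [foldA_eq_add_fold]
  simp [PySem.List.dedup, PySem.Set.ofList, PySem.Set.empty]

-- under Pre_, the per-rule mapping factors through the extracted op sequence
lemma ops_bridge (rules : List (List (String × String)))
    (hpre : Pre_sorted_term_ops rules) :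
    (opsOf rules).filterMap (fun op => TERM_OP_NAME.get? op) = rules.filterMap termOpA := by
  unfold opsOf
  rw [List.filterMap_map]
  apply List.filterMap_congr
  intro r hr
  have hc : (PySem.Dict.mk r).contains "op" = true := by
    have := (List.all_eq_true.mp hpre) r hr
    simpa using this
  rw [PySem.Dict.contains_eq_isSome_get?] at hc
  cases hx : (PySem.Dict.mk r).get? "op" with
  | none => rw [hx] at hc; cases hc
  | some v => simp [Function.comp, termOpA, hx]

-- ===== VERDICT (by name: the statement is the Claim_ definition above) =====
theorem sorted_term_ops_spec : Claim_equal_sorted_term_ops := by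
  intro rules _ hpre
  unfold Spec_sorted_term_ops sorted_term_ops_alt
  rw [A_eq_dedup, B_core_eq, ops_bridge rules hpre]
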